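-- pv_equiv track=rewrite | github.com/shimjaeman/CodingTest | 프로그래머스/lv2/17687. ［3차］ n진수 게임/［3차］ n진수 게임.py | solution
-- ===== SOURCE A (Python) =====
-- def convert (n, base):
--     T = "0123456789ABCDEF"
--     q, r = divmod(n, base)
--     if q == 0:
--         return T[r]
--     else:
--         return convert(q, base) + T[r]
--
-- def solution(n, t, m, p):
--     n_num_list = [convert(i, n) for i in range(0, t * m)]
--     result = ""
--     stop_num, order = 0, 1
--     for num in n_num_list:
--         for game_num in num:
--             if stop_num == t:
--                 break
--             elif order % m == p % m:
--                 result += game_num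
--                 stop_num +=1
--             order += 1
--     return result
-- ===== SOURCE B (Python) =====
-- def convert(n, base):
--     T = "0123456789ABCDEF"
--     q, r = divmod(n, base)
--     if q == 0:
--         return T[r]
--     else:
--         return convert(q, base) + T[r]
--
--
-- def solution(n, t, m, p):
--     s = "".join(convert(i, n) for i in range(t * m))
--     return s[(p - 1) % m::m][:t]
-- ===== Notes on version B (the rewrite author's own statement) =====
-- stated objective: simpler
-- what changed: B builds the digit stream once by joining the converted numbers and selects the answer with a single stride slice s[(p-1)%m::m][:t], replacing A's per-character counting loop with its stop_num/order state and modulo test.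
-- outside the precondition, e.g. on solution(2, 3, 0, 5): A returns '', B raises ZeroDivisionError; on solution(2, -2, -3, 1): A returns '0011', B returns ''; on solution(20, 1, 1, 1): A returns '0', B returns '0'
import Mathlib
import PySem

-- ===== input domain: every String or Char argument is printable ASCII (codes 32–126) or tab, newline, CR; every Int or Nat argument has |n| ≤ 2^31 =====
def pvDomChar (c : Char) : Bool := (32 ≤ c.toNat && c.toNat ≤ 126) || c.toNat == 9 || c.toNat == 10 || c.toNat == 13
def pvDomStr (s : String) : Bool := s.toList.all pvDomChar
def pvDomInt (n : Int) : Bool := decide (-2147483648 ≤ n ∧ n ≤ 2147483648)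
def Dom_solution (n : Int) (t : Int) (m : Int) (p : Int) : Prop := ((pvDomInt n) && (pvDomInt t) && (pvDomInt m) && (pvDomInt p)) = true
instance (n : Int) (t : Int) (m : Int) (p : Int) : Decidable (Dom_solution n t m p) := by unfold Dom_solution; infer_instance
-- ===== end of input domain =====

-- B replaces A's per-character counting loop (stop_num/order state, modulo test) by joining
-- the digit stream once and taking a single stride slice s[(p-1)%m::m][:t]; return values only.

-- ===== PORT A =====
-- T = "0123456789ABCDEF"
def pvT : List Char := ['0','1','2','3','4','5','6','7','8','9','A','B','C','D','E','F']

-- convert(n, base), shared verbatim by Source A and Source B; fuel-structured recursion (128 covers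
-- the digit count of every admitted input); T[r] via pyGet? (none = IndexError, outside Pre_)
def pvConvert : Nat → Int → Int → List Char
  | 0, _, _ => []
  | Nat.succ fuel, i, base =>
    let q := PySem.Int.floordiv i base
    let r := PySem.Int.mod i base
    let d := (PySem.List.pyGet? pvT r).getD ' '
    if q = 0 then [d] else pvConvert fuel q base ++ [d]

-- the inner 'for game_num in num' loop of A, with its break; state = (result, stop_num, order)
def pvInner (t m p : Int) : List Char → (List Char × Int × Int) → (List Char × Int × Int)
  | [], st => st
  | c :: rest, (res, stop, order) =>
    if stop = t then (res, stop, order)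
    else if PySem.Int.mod order m = PySem.Int.mod p m then
      pvInner t m p rest (res ++ [c], stop + 1, order + 1)
    else pvInner t m p rest (res, stop, order + 1)

def solution (n : Int) (t : Int) (m : Int) (p : Int) : String :=
  let n_num_list := (PySem.List.pyRange 0 (t * m) 1).map (fun i => pvConvert 128 i n)
  let st := n_num_list.foldl (fun st num => pvInner t m p num st) ([], 0, 1)
  String.ofList st.1

-- ===== PORT B =====
def solution_alt (n : Int) (t : Int) (m : Int) (p : Int) : String :=
  let s := ((PySem.List.pyRange 0 (t * m) 1).map (fun i => pvConvert 128 i n)).flatten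
  let picked := (PySem.List.slice? s (some (PySem.Int.mod (p - 1) m)) none m).getD []  -- none only for m = 0, outside Pre_
  String.ofList (PySem.List.slice picked none (some t))

-- ===== PRECONDITION & SPEC =====
-- Pre_ excludes: m = 0 (A returns '' on an empty stream where B's stride raises ZeroDivisionError);
-- m < 0 with a nonempty stream (B's negative-step slice reads backwards where A's forward picking
-- is accidental for the game); and bases with |n| outside 2..16 when digits are demanded, where
-- convert mostly raises (ZeroDivision/Recursion/IndexError) and the few returning cases rely on
-- Python's negative-index wraparound into the digit table (B agrees with A there anyway).
def Pre_solution (n : Int) (t : Int) (m : Int) (p : Int) : Prop :=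
  m ≠ 0 ∧ (t * m ≤ 0 ∨ (1 ≤ m ∧ ((2 ≤ n ∧ n ≤ 16) ∨ (-16 ≤ n ∧ n ≤ -2))))
instance (n : Int) (t : Int) (m : Int) (p : Int) : Decidable (Pre_solution n t m p) := by
  unfold Pre_solution; infer_instance

def pvWitness_solution : Int × Int × Int × Int := (2, 4, 2, 1)

def Spec_solution (n : Int) (t : Int) (m : Int) (p : Int) (out : String) : Prop := out = solution_alt n t m p
instance (n : Int) (t : Int) (m : Int) (p : Int) (out : String) : Decidable (Spec_solution n t m p out) := by unfold Spec_solution; infer_instance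

-- ===== CLAIM (what is proved, stated in full; the proofs are below) =====
def Claim_equal_solution : Prop := ∀ (n : Int) (t : Int) (m : Int) (p : Int), Dom_solution n t m p → Pre_solution n t m p → Spec_solution n t m p (solution n t m p)

-- ===== LEMMAS AND PROOFS =====

-- the selection A performs, over the flattened stream, without the result accumulator:
-- keep the chars whose 1-based position `o` satisfies o % m == p % m
def pickAll (m p : Int) : List Char → Int → List Char
  | [], _ => []
  | c :: rest, o =>
    if PySem.Int.mod o m = PySem.Int.mod p m then c :: pickAll m p rest (o + 1)
    else pickAll m p rest (o + 1)

-- every m-th element, starting with the head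
def pickEvery (m : Nat) : List Char → List Char
  | [] => []
  | c :: rest => c :: pickEvery m (rest.drop (m - 1))
termination_by l => l.length
decreasing_by simp only [List.length_cons, List.length_drop]; omega

theorem pickEvery_nil (m : Nat) : pickEvery m [] = [] := by
  rw [pickEvery.eq_def]

theorem pickEvery_cons (m : Nat) (c : Char) (rest : List Char) :
    pickEvery m (c :: rest) = c :: pickEvery m (rest.drop (m - 1)) := by
  rw [pickEvery.eq_def]

-- once stop_num = t the scan is frozen
theorem pvInner_frozen (t m p : Int) (l : List Char) (res : List Char) (order : Int) :
    pvInner t m p l (res, t, order) = (res, t, order) := by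
  cases l with
  | nil => rfl
  | cons c rest => simp [pvInner]

-- scanning a concatenation = scanning the pieces in turn (A's outer loop over the number list)
theorem pvInner_append (t m p : Int) (a b : List Char) (st : List Char × Int × Int) :
    pvInner t m p (a ++ b) st = pvInner t m p b (pvInner t m p a st) := by
  induction a generalizing st with
  | nil => rfl
  | cons c rest ih =>
    obtain ⟨res, stop, order⟩ := st
    by_cases h : stop = t
    · subst h; simp [pvInner, pvInner_frozen]
    · by_cases h2 : PySem.Int.mod order m = PySem.Int.mod p m
      · simp [pvInner, h, h2, ih]
      · simp [pvInner, h, h2, ih]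

theorem foldl_pvInner_flatten (t m p : Int) (nums : List (List Char)) (st : List Char × Int × Int) :
    nums.foldl (fun st num => pvInner t m p num st) st = pvInner t m p nums.flatten st := by
  induction nums generalizing st with
  | nil => rfl
  | cons x xs ih => simp [List.foldl_cons, ih, List.flatten_cons, pvInner_append]

-- the scan result = accumulator ++ (take (t - stop_num) of the full selection)
theorem pvInner_spec (t m p : Int) (L : List Char) (res : List Char) (stop order : Int)
    (h : stop ≤ t) :
    (pvInner t m p L (res, stop, order)).1 = res ++ (pickAll m p L order).take (t - stop).toNat := by
  induction L generalizing res stop order with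
  | nil => simp [pvInner, pickAll]
  | cons c rest ih =>
    by_cases hs : stop = t
    · subst hs
      simp [pvInner]
    · have hlt : stop < t := lt_of_le_of_ne h hs
      have hk : (t - stop).toNat = (t - (stop + 1)).toNat + 1 := by omega
      by_cases h2 : PySem.Int.mod order m = PySem.Int.mod p m
      · rw [pvInner, if_neg hs, if_pos h2, ih _ _ _ (by omega)]
        simp [pickAll, h2, hk]
      · rw [pvInner, if_neg hs, if_neg h2, ih _ _ _ h]
        simp [pickAll, h2]

-- arithmetic helpers: decrementing an argument steps its residue down (wrapping at 0)
theorem emod_pred (m a : Int) (hm : 1 ≤ m) (ha : a % m = 0) : (a - 1) % m = m - 1 := by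
  obtain ⟨k, hk⟩ := Int.dvd_of_emod_eq_zero ha
  have h1 : a - 1 = (m - 1) + m * (k - 1) := by rw [hk]; ring
  rw [h1, Int.add_mul_emod_self_left, Int.emod_eq_of_lt (by omega) (by omega)]

theorem emod_pred' (m a : Int) (hm : 1 ≤ m) (ha : 1 ≤ a % m) : (a - 1) % m = a % m - 1 := by
  have hlt : a % m < m := Int.emod_lt_of_pos a (by omega)
  have hsplit := Int.emod_add_mul_ediv a m
  have h1 : a - 1 = (a % m - 1) + m * (a / m) := by linarith
  rw [h1, Int.add_mul_emod_self_left, Int.emod_eq_of_lt (by omega) (by omega)]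

-- the full selection is a stride over the stream, starting at the first matching position
theorem pickAll_eq_pickEvery (m p : Int) (hm : 1 ≤ m) (L : List Char) (o : Int) :
    pickAll m p L o = pickEvery m.toNat (L.drop (PySem.Int.mod (p - o) m).toNat) := by
  induction L generalizing o with
  | nil => simp [pickAll, pickEvery_nil]
  | cons c rest ih =>
    have hmpos : (0 : Int) < m := by omega
    have hmods : ∀ x : Int, PySem.Int.mod x m = x % m := fun x => PySem.Int.mod_eq_emod_of_pos hmpos
    rw [hmods]
    by_cases h2 : PySem.Int.mod o m = PySem.Int.mod p m
    · have h2' : p % m = o % m := by rw [hmods, hmods] at h2; exact h2.symm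
      have hz : (p - o) % m = 0 := Int.emod_eq_emod_iff_emod_sub_eq_zero.mp h2'
      have hz1 : (p - (o + 1)) % m = m - 1 := by
        have h := emod_pred m (p - o) hm hz
        rw [show p - (o + 1) = p - o - 1 by ring]
        exact h
      rw [pickAll, if_pos h2, hz]
      simp only [Int.toNat_zero, List.drop_zero]
      rw [pickEvery_cons, ih (o + 1), hmods, hz1]
      have he : (m - 1).toNat = m.toNat - 1 := by omega
      rw [he]
    · have h0 : 0 ≤ (p - o) % m := Int.emod_nonneg _ (by omega)
      have hnz : 1 ≤ (p - o) % m := by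
        rcases lt_or_eq_of_le h0 with h1 | h1
        · omega
        · exfalso
          apply h2
          rw [hmods, hmods]
          exact (Int.emod_eq_emod_iff_emod_sub_eq_zero.mpr h1.symm).symm
      have hz1 : (p - (o + 1)) % m = (p - o) % m - 1 := by
        have h := emod_pred' m (p - o) hm hnz
        rw [show p - (o + 1) = p - o - 1 by ring]
        exact h
      have hdrop : ((p - o) % m).toNat = (((p - (o + 1)) % m).toNat) + 1 := by
        rw [hz1]; omega
      rw [pickAll, if_neg h2, ih (o + 1), hmods, hdrop, List.drop_succ_cons]

-- a stride filterMap over enough indices is pickEvery of the dropped prefix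
theorem filterMap_stride (xs : List Char) (a mN : Nat) (hm : 0 < mN) (cnt : Nat)
    (hcnt : xs.length ≤ a + mN * cnt) :
    List.filterMap (fun k : Nat => xs[a + mN * k]?) (List.range cnt) = pickEvery mN (xs.drop a) := by
  induction cnt generalizing a with
  | zero =>
    have hd : xs.drop a = [] := List.drop_eq_nil_of_le (by omega)
    simp [hd, pickEvery_nil]
  | succ cnt ih =>
    have hfun : ((fun k : Nat => xs[a + mN * k]?) ∘ Nat.succ) = (fun k : Nat => xs[(a + mN) + mN * k]?) := by
      funext k
      simp only [Function.comp, Nat.succ_eq_add_one]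
      congr 1
      ring
    rw [List.range_succ_eq_map, List.filterMap_cons, List.filterMap_map, hfun]
    simp only [Nat.mul_zero, Nat.add_zero]
    cases hx : xs[a]? with
    | none =>
      have hlen : xs.length ≤ a := List.getElem?_eq_none_iff.mp hx
      have h1 : xs.drop a = [] := List.drop_eq_nil_of_le hlen
      have h2 : xs.drop (a + mN) = [] := List.drop_eq_nil_of_le (by omega)
      rw [ih (a + mN) (by omega), h1, h2]
    | some c =>
      obtain ⟨hlt, hc⟩ := List.getElem?_eq_some_iff.mp hx
      have h1 : xs.drop a = c :: xs.drop (a + 1) := by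
        rw [List.drop_eq_getElem_cons hlt, hc]
      have hstep : mN * (cnt + 1) = mN + mN * cnt := by ring
      rw [h1, pickEvery_cons, ih (a + mN) (by omega), List.drop_drop]
      have he : a + 1 + (mN - 1) = a + mN := by omega
      rw [he]

-- B's positive-step slice is exactly that stride
theorem slice?_pos (xs : List Char) (s m : Int) (hs : 0 ≤ s) (hm : 0 < m) :
    PySem.List.slice? xs (some s) none m = some (pickEvery m.toNat (xs.drop s.toNat)) := by
  have hlen0 : (0:Int) ≤ (xs.length:Int) := Int.natCast_nonneg _
  have hsmin : (0:Int) ≤ min s (xs.length:Int) := le_min hs hlen0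
  have hred : PySem.List.slice? xs (some s) none m =
      some (List.filterMap (fun k : Nat => xs[(min s (xs.length:Int) + m * (k:Int)).toNat]?)
        (List.range (if min s (xs.length:Int) < (xs.length:Int)
          then (((xs.length:Int) - min s (xs.length:Int) + m - 1) / m).toNat else 0))) := by
    simp [PySem.List.slice?, PySem.List.sliceIndices, hm.ne', not_lt_of_gt hm, not_lt.mpr hs, hm]
  rw [hred]
  have hfun : (fun k : Nat => xs[(min s (xs.length:Int) + m * (k:Int)).toNat]?) =
      (fun k : Nat => xs[(min s (xs.length:Int)).toNat + m.toNat * k]?) := by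
    funext k
    have hmk : m * (k:Int) = ((m.toNat * k : Nat) : Int) := by
      push_cast [Int.toNat_of_nonneg hm.le]
      ring
    rw [hmk]
    congr 1
    generalize m.toNat * k = w
    omega
  rw [hfun]
  have hbound : xs.length ≤ (min s (xs.length:Int)).toNat + m.toNat *
      (if min s (xs.length:Int) < (xs.length:Int)
        then (((xs.length:Int) - min s (xs.length:Int) + m - 1) / m).toNat else 0) := by
    by_cases hml : min s (xs.length:Int) < (xs.length:Int)
    · rw [if_pos hml]
      have hem := Int.emod_add_mul_ediv ((xs.length:Int) - min s (xs.length:Int) + m - 1) m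
      have hr0 : 0 ≤ ((xs.length:Int) - min s (xs.length:Int) + m - 1) % m := Int.emod_nonneg _ (by omega)
      have hr1 : ((xs.length:Int) - min s (xs.length:Int) + m - 1) % m < m := Int.emod_lt_of_pos _ hm
      have hq0 : 0 ≤ ((xs.length:Int) - min s (xs.length:Int) + m - 1) / m :=
        Int.ediv_nonneg (by omega) (by omega)
      have hd : (xs.length:Int) - min s (xs.length:Int) ≤
          m * (((xs.length:Int) - min s (xs.length:Int) + m - 1) / m) := by linarith
      have hcast : ((m.toNat * (((xs.length:Int) - min s (xs.length:Int) + m - 1) / m).toNat : Nat) : Int) =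
          m * (((xs.length:Int) - min s (xs.length:Int) + m - 1) / m) := by
        push_cast [Int.toNat_of_nonneg hm.le, Int.toNat_of_nonneg hq0]
        ring
      generalize hw : m.toNat * (((xs.length:Int) - min s (xs.length:Int) + m - 1) / m).toNat = w at hcast ⊢
      rw [← hcast] at hd
      omega
    · rw [if_neg hml]
      have : min s (xs.length:Int) = (xs.length:Int) := by omega
      omega
  rw [filterMap_stride xs _ m.toNat (by omega) _ hbound]
  by_cases hle : s ≤ (xs.length:Int)
  · have : min s (xs.length:Int) = s := min_eq_left hle
    rw [this]
  · have h1 : xs.drop (min s (xs.length:Int)).toNat = [] := List.drop_eq_nil_of_le (by omega)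
    have h2 : xs.drop s.toNat = [] := List.drop_eq_nil_of_le (by omega)
    rw [h1, h2]

theorem solution_eq (n t m p : Int) (hm : m ≠ 0)
    (h : t * m ≤ 0 ∨ 1 ≤ m) : solution n t m p = solution_alt n t m p := by
  by_cases htm : t * m ≤ 0
  · have hrange : PySem.List.pyRange 0 (t * m) 1 = [] := by
      simp [PySem.List.pyRange, not_lt.mpr htm]
    simp only [solution, solution_alt]
    rw [hrange]
    simp only [List.map_nil, List.foldl_nil, List.flatten_nil]
    have hslice : PySem.List.slice? ([] : List Char) (some (PySem.Int.mod (p - 1) m)) none m = some [] := by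
      simp [PySem.List.slice?, hm]
    rw [hslice]
    simp [PySem.List.slice]
  · have hm1 : 1 ≤ m := h.resolve_left htm
    have hmpos : (0 : Int) < m := by omega
    have ht : 1 ≤ t := by
      by_contra ht0
      exact htm (by simpa using mul_le_mul_of_nonneg_right (by omega : t ≤ 0) (by omega : (0:Int) ≤ m))
    simp only [solution, solution_alt]
    rw [foldl_pvInner_flatten]
    rw [pvInner_spec t m p _ [] 0 1 (by omega)]
    rw [pickAll_eq_pickEvery m p hm1 _ 1]
    rw [slice?_pos _ (PySem.Int.mod (p - 1) m) m (PySem.Int.mod_nonneg _ hmpos) hmpos]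
    simp only [Option.getD_some, List.nil_append]
    rw [PySem.List.slice_to _ (by omega : (0:Int) ≤ t)]
    simp

-- ===== VERDICT (by name: the statement is the Claim_ definition above) =====
theorem solution_spec : Claim_equal_solution := by
  intro n t m p _ hpre
  unfold Spec_solution
  exact solution_eq n t m p hpre.1 (hpre.2.imp id And.left)
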